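-- pv_equiv track=rewrite | github.com/Rahul-pro1/DSA_Lab | Tree Traversal/app.py | generate_inorder_traversal_steps
-- ===== SOURCE A (Python) =====
-- def generate_inorder_traversal_steps(tree_structure):
--     steps, descriptions, highlighted, traversal_result, traversal_path = [], [], [], [], []
--     stack = []
--     current_node = 0
--
--     if 0 not in tree_structure or tree_structure[0] == "":
--         steps.append(tree_structure.copy())
--         descriptions.append("Root node is empty. Please provide a value for the root (Node 0).")
--         highlighted.append([])
--         return steps, descriptions, highlighted, traversal_result, []
--
--     while stack or (current_node is not None and tree_structure.get(current_node, "") != ""):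
--         while current_node is not None and tree_structure.get(current_node, "") != "":
--             stack.append(current_node)
--             steps.append(tree_structure.copy())
--             descriptions.append(f"Push node {tree_structure[current_node]} (index {current_node}) to stack")
--             highlighted.append([current_node])
--             traversal_path.append(current_node)
--             current_node = 2 * current_node + 1
--
--         current_node = stack.pop()
--         traversal_result.append(tree_structure[current_node])
--         steps.append(tree_structure.copy())
--         descriptions.append(f"Visit node {tree_structure[current_node]} (index {current_node})")
--         highlighted.append([current_node])
--         traversal_path.append(current_node)
--
--         current_node = 2 * current_node + 2
--
--     return steps, descriptions, highlighted, traversal_result, traversal_path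
-- ===== SOURCE B (Python) =====
-- def generate_inorder_traversal_steps(tree_structure):
--     if 0 not in tree_structure or tree_structure[0] == "":
--         return ([tree_structure.copy()],
--                 ["Root node is empty. Please provide a value for the root (Node 0)."],
--                 [[]], [], [])
--
--     steps, descriptions, highlighted, traversal_result, traversal_path = [], [], [], [], []
--
--     def rec(node):
--         if tree_structure.get(node, "") == "":
--             return
--         steps.append(tree_structure.copy())
--         descriptions.append(f"Push node {tree_structure[node]} (index {node}) to stack")
--         highlighted.append([node])
--         traversal_path.append(node)
--         rec(2 * node + 1)
--         traversal_result.append(tree_structure[node])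
--         steps.append(tree_structure.copy())
--         descriptions.append(f"Visit node {tree_structure[node]} (index {node})")
--         highlighted.append([node])
--         traversal_path.append(node)
--         rec(2 * node + 2)
--
--     rec(0)
--     return steps, descriptions, highlighted, traversal_result, traversal_path
-- ===== Notes on version B (the rewrite author's own statement) =====
-- stated objective: alternative
-- what changed: Replaces the explicit-stack iterative inorder loop (inner descend-left while + pop/visit outer while) by a direct recursive traversal rec(node) that records push-on-descent and visit-on-return steps; same guard and identical output.
import Mathlib
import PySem

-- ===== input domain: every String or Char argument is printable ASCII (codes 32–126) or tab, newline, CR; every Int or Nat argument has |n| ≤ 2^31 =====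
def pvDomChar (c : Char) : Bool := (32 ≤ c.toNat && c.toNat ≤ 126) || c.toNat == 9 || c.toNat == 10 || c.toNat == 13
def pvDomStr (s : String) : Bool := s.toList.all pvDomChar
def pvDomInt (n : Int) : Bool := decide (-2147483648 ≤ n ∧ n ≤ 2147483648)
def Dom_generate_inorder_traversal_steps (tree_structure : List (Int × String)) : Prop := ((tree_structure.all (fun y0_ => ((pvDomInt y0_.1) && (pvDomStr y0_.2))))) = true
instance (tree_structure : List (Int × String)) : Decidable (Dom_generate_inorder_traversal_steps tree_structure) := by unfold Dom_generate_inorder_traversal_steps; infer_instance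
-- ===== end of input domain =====

-- B replaces A's explicit-stack iterative traversal loop by a recursive helper; same outputs (objective: alternative decomposition).

-- shared lookup helper: tree_structure.get(k, "") (dict lookup, first match)
def pvTget (d : List (Int × String)) (k : Int) : String := (PySem.Dict.mk d).getD k ""

-- termination measure for the implicit-heap recursion: number of dict entries whose key
-- holds a nonempty value and is ≥ n (cited by the ports' decreasing_by)
def pvMeas (d : List (Int × String)) (n : Nat) : Nat :=
  ((d.map Prod.fst).filter (fun k => (pvTget d k != "") && ((n : Int) ≤ k))).length

theorem pvLenFiltLe {α : Type} (l : List α) (p q : α → Bool)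
    (himp : ∀ x, q x = true → p x = true) :
    (l.filter q).length ≤ (l.filter p).length := by
  induction l with
  | nil => simp
  | cons a t ih =>
    by_cases hq : q a = true
    · rw [List.filter_cons_of_pos hq, List.filter_cons_of_pos (himp a hq)]
      simpa using ih
    · rw [List.filter_cons_of_neg (by simp [hq])]
      by_cases hp : p a = true
      · rw [List.filter_cons_of_pos hp]; exact Nat.le_succ_of_le ih
      · rw [List.filter_cons_of_neg (by simp [hp])]; exact ih

theorem pvLenFiltLt {α : Type} (l : List α) (p q : α → Bool)
    (himp : ∀ x, q x = true → p x = true) (x : α) (hx : x ∈ l)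
    (hp : p x = true) (hq : q x = false) :
    (l.filter q).length < (l.filter p).length := by
  induction l with
  | nil => cases hx
  | cons a t ih =>
    rcases List.mem_cons.mp hx with rfl | hxt
    · rw [List.filter_cons_of_pos hp, List.filter_cons_of_neg (by simp [hq])]
      exact Nat.lt_succ_of_le (pvLenFiltLe t p q himp)
    · by_cases hqa : q a = true
      · rw [List.filter_cons_of_pos hqa, List.filter_cons_of_pos (himp a hqa)]
        simpa using ih hxt
      · rw [List.filter_cons_of_neg (by simp [hqa])]
        by_cases hpa : p a = true
        · rw [List.filter_cons_of_pos hpa]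
          exact Nat.lt_succ_of_lt (ih hxt)
        · rw [List.filter_cons_of_neg (by simp [hpa])]; exact ih hxt

theorem pvMemKeys (d : List (Int × String)) (k : Int) (h : pvTget d k ≠ "") :
    k ∈ d.map Prod.fst := by
  cases hc : (PySem.Dict.mk d).contains k with
  | true =>
    have := (PySem.Dict.contains_iff_mem_keys (d := PySem.Dict.mk d) (k := k)).mp hc
    simpa [PySem.Dict.keys] using this
  | false =>
    exact absurd (PySem.Dict.getD_of_not_contains (d := PySem.Dict.mk d) (k := k) (d0 := "") hc) h

theorem pvFiltLt (d : List (Int × String)) (n m : Nat)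
    (h : pvTget d (n : Int) ≠ "") (hnm : n < m) : pvMeas d m < pvMeas d n := by
  refine pvLenFiltLt (d.map Prod.fst)
    (fun k => (pvTget d k != "") && ((n : Int) ≤ k))
    (fun k => (pvTget d k != "") && ((m : Int) ≤ k))
    ?_ ((n : Int)) (pvMemKeys d _ h) ?_ ?_
  · intro x hx
    simp only [Bool.and_eq_true, decide_eq_true_eq] at hx ⊢
    refine ⟨hx.1, le_trans ?_ hx.2⟩
    exact_mod_cast Nat.le_of_lt hnm
  · simp [h]
  · have : ¬ ((m : Int) ≤ (n : Int)) := by exact_mod_cast Nat.not_le.mpr hnm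
    simp [this]

-- ===== PORT A =====
-- A's nested whiles flattened into one step-per-call loop (identical control flow:
-- descend-left push when current has a value, else pop+visit, else stop).
-- The fuel argument is a totality guard only; 2^(len+2) is proved sufficient below.
def pvLoopA (d : List (Int × String)) :
    Nat → List Int → Int →
    (List (List (Int × String))) × List String × List (List Int) × List String × List Int →
    (List (List (Int × String))) × List String × List (List Int) × List String × List Int
  | 0, _, _, acc => acc
  | fuel + 1, stack, cur, (steps, descs, highs, res, path) =>
    if pvTget d cur != "" then
      pvLoopA d fuel (cur :: stack) (2 * cur + 1)
        (steps ++ [d],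
         descs ++ ["Push node " ++ pvTget d cur ++ " (index " ++ PySem.Int.toStr cur ++ ") to stack"],
         highs ++ [[cur]], res, path ++ [cur])
    else
      match stack with
      | [] => (steps, descs, highs, res, path)
      | x :: s =>
        pvLoopA d fuel s (2 * x + 2)
          (steps ++ [d],
           descs ++ ["Visit node " ++ pvTget d x ++ " (index " ++ PySem.Int.toStr x ++ ")"],
           highs ++ [[x]], res ++ [pvTget d x], path ++ [x])

def generate_inorder_traversal_steps (tree_structure : List (Int × String)) : (List (List (Int × String))) × List String × List (List Int) × List String × List Int :=
  if !((PySem.Dict.mk tree_structure).contains 0) || (pvTget tree_structure 0 == "") then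
    ([tree_structure], ["Root node is empty. Please provide a value for the root (Node 0)."], [[]], [], [])
  else
    pvLoopA tree_structure (2 ^ (tree_structure.length + 2)) [] 0 ([], [], [], [], [])

-- ===== PORT B =====
-- B's recursive helper rec(node), threading the five accumulated lists
def pvRecB (d : List (Int × String)) (n : Nat)
    (acc : (List (List (Int × String))) × List String × List (List Int) × List String × List Int) :
    (List (List (Int × String))) × List String × List (List Int) × List String × List Int :=
  if h : pvTget d (n : Int) = "" then acc
  else
    match acc with
    | (steps, descs, highs, res, path) =>
      match pvRecB d (2 * n + 1)
        (steps ++ [d],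
         descs ++ ["Push node " ++ pvTget d (n : Int) ++ " (index " ++ PySem.Int.toStr (n : Int) ++ ") to stack"],
         highs ++ [[(n : Int)]], res, path ++ [(n : Int)]) with
      | (s2, d2, h2, r2, p2) =>
        pvRecB d (2 * n + 2)
          (s2 ++ [d],
           d2 ++ ["Visit node " ++ pvTget d (n : Int) ++ " (index " ++ PySem.Int.toStr (n : Int) ++ ")"],
           h2 ++ [[(n : Int)]], r2 ++ [pvTget d (n : Int)], p2 ++ [(n : Int)])
termination_by pvMeas d n
decreasing_by
  · exact pvFiltLt d n (2 * n + 1) (by exact_mod_cast h) (by omega)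
  · exact pvFiltLt d n (2 * n + 2) (by exact_mod_cast h) (by omega)

def generate_inorder_traversal_steps_alt (tree_structure : List (Int × String)) : (List (List (Int × String))) × List String × List (List Int) × List String × List Int :=
  if !((PySem.Dict.mk tree_structure).contains 0) || (pvTget tree_structure 0 == "") then
    ([tree_structure], ["Root node is empty. Please provide a value for the root (Node 0)."], [[]], [], [])
  else
    pvRecB tree_structure 0 ([], [], [], [], [])

-- ===== PRECONDITION & SPEC =====
def Spec_generate_inorder_traversal_steps (tree_structure : List (Int × String)) (out : (List (List (Int × String))) × List String × List (List Int) × List String × List Int) : Prop := out = generate_inorder_traversal_steps_alt tree_structure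
instance (tree_structure : List (Int × String)) (out : (List (List (Int × String))) × List String × List (List Int) × List String × List Int) : Decidable (Spec_generate_inorder_traversal_steps tree_structure out) := by unfold Spec_generate_inorder_traversal_steps; infer_instance

-- ===== CLAIM (what is proved, stated in full; the proofs are below) =====
def Claim_equal_generate_inorder_traversal_steps : Prop := ∀ (tree_structure : List (Int × String)), Dom_generate_inorder_traversal_steps tree_structure → Spec_generate_inorder_traversal_steps tree_structure (generate_inorder_traversal_steps tree_structure)

-- ===== LEMMAS AND PROOFS =====

-- size of the implicit subtree rooted at n
def pvSize (d : List (Int × String)) (n : Nat) : Nat :=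
  if h : pvTget d (n : Int) = "" then 0
  else 1 + pvSize d (2 * n + 1) + pvSize d (2 * n + 2)
termination_by pvMeas d n
decreasing_by
  · exact pvFiltLt d n (2 * n + 1) (by exact_mod_cast h) (by omega)
  · exact pvFiltLt d n (2 * n + 2) (by exact_mod_cast h) (by omega)

-- the node where A's loop stands after finishing the subtree at n (always an empty slot)
def pvRbS (d : List (Int × String)) (n : Nat) : Nat :=
  if h : pvTget d (n : Int) = "" then n else pvRbS d (2 * n + 2)
termination_by pvMeas d n
decreasing_by
  exact pvFiltLt d n (2 * n + 2) (by exact_mod_cast h) (by omega)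

theorem pvRbS_none (d : List (Int × String)) (n : Nat) :
    pvTget d ((pvRbS d n : Nat) : Int) = "" := by
  induction n using pvRbS.induct (d := d) with
  | case1 n h => rw [pvRbS]; simp [h]
  | case2 n h ih => rw [pvRbS]; simpa [h] using ih

theorem pvMeasPos (d : List (Int × String)) (n : Nat)
    (h : pvTget d (n : Int) ≠ "") : 0 < pvMeas d n := by
  have hmem : (n : Int) ∈ (d.map Prod.fst).filter
      (fun k => (pvTget d k != "") && ((n : Int) ≤ k)) :=
    List.mem_filter.mpr ⟨pvMemKeys d _ h, by simp [h]⟩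
  exact List.length_pos_of_mem hmem

theorem pvLoopA_push (d : List (Int × String)) (fu : Nat) (st : List Int) (cur : Int)
    (steps : List (List (Int × String))) (descs : List String) (highs : List (List Int))
    (res : List String) (path : List Int) (hb : (pvTget d cur != "") = true) :
    pvLoopA d (fu + 1) st cur (steps, descs, highs, res, path)
      = pvLoopA d fu (cur :: st) (2 * cur + 1)
          (steps ++ [d],
           descs ++ ["Push node " ++ pvTget d cur ++ " (index " ++ PySem.Int.toStr cur ++ ") to stack"],
           highs ++ [[cur]], res, path ++ [cur]) := by
  rw [pvLoopA.eq_def]; simp [hb]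

theorem pvLoopA_pop (d : List (Int × String)) (fu : Nat) (x : Int) (st : List Int) (cur : Int)
    (steps : List (List (Int × String))) (descs : List String) (highs : List (List Int))
    (res : List String) (path : List Int) (hb : (pvTget d cur != "") = false) :
    pvLoopA d (fu + 1) (x :: st) cur (steps, descs, highs, res, path)
      = pvLoopA d fu st (2 * x + 2)
          (steps ++ [d],
           descs ++ ["Visit node " ++ pvTget d x ++ " (index " ++ PySem.Int.toStr x ++ ")"],
           highs ++ [[x]], res ++ [pvTget d x], path ++ [x]) := by
  rw [pvLoopA.eq_def]; simp [hb]

theorem pvLoopA_stop (d : List (Int × String)) (fu : Nat) (cur : Int)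
    (steps : List (List (Int × String))) (descs : List String) (highs : List (List Int))
    (res : List String) (path : List Int) (hb : (pvTget d cur != "") = false) :
    pvLoopA d (fu + 1) [] cur (steps, descs, highs, res, path)
      = (steps, descs, highs, res, path) := by
  rw [pvLoopA.eq_def]; simp [hb]

-- main simulation lemma: A's loop, run for exactly the subtree's 2*size steps,
-- records what B's recursion records and resumes at the empty slot pvRbS d n
theorem pvSim (d : List (Int × String)) (m : Nat) : ∀ (n : Nat), pvMeas d n ≤ m →
    ∀ (f : Nat) (s : List Int)
      (acc : (List (List (Int × String))) × List String × List (List Int) × List String × List Int),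
      pvLoopA d (2 * pvSize d n + f) s (n : Int) acc
        = pvLoopA d f s ((pvRbS d n : Nat) : Int) (pvRecB d n acc) := by
  induction m with
  | zero =>
    intro n hn f s acc
    by_cases h : pvTget d (n : Int) = ""
    · have hs : pvSize d n = 0 := by rw [pvSize]; simp [h]
      have hr : pvRbS d n = n := by rw [pvRbS]; simp [h]
      have hb : pvRecB d n acc = acc := by rw [pvRecB]; simp [h]
      rw [hs, hr, hb]; norm_num
    · exact absurd hn (by have := pvMeasPos d n h; omega)
  | succ m ih =>
    intro n hn f s acc
    by_cases h : pvTget d (n : Int) = ""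
    · have hs : pvSize d n = 0 := by rw [pvSize]; simp [h]
      have hr : pvRbS d n = n := by rw [pvRbS]; simp [h]
      have hb : pvRecB d n acc = acc := by rw [pvRecB]; simp [h]
      rw [hs, hr, hb]; norm_num
    · obtain ⟨steps, descs, highs, res, path⟩ := acc
      have hm1 : pvMeas d (2 * n + 1) ≤ m := by
        have := pvFiltLt d n (2 * n + 1) h (by omega); omega
      have hm2 : pvMeas d (2 * n + 2) ≤ m := by
        have := pvFiltLt d n (2 * n + 2) h (by omega); omega
      have hsz : pvSize d n = 1 + pvSize d (2 * n + 1) + pvSize d (2 * n + 2) := by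
        rw [pvSize]; simp [h]
      have hfu : 2 * pvSize d n + f
          = (2 * pvSize d (2 * n + 1) + (1 + 2 * pvSize d (2 * n + 2) + f)) + 1 := by omega
      have hb1 : (pvTget d (n : Int) != "") = true := by simp [h]
      rw [hfu]
      rw [pvLoopA_push d _ _ _ _ _ _ _ _ hb1]
      have hc1 : (2 * (n : Int) + 1) = (((2 * n + 1 : Nat) : Nat) : Int) := by push_cast; ring
      rw [hc1]
      rw [ih (2 * n + 1) hm1]
      rcases hB : pvRecB d (2 * n + 1)
          (steps ++ [d],
           descs ++ ["Push node " ++ pvTget d (n : Int) ++ " (index " ++ PySem.Int.toStr (n : Int) ++ ") to stack"],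
           highs ++ [[(n : Int)]], res, path ++ [(n : Int)]) with ⟨S2, D2, H2, R2, P2⟩
      have hfu2 : 1 + 2 * pvSize d (2 * n + 2) + f = (2 * pvSize d (2 * n + 2) + f) + 1 := by omega
      rw [hfu2]
      have hb2 : (pvTget d ((pvRbS d (2 * n + 1) : Nat) : Int) != "") = false := by
        simp [pvRbS_none]
      rw [pvLoopA_pop d _ _ _ _ _ _ _ _ _ hb2]
      have hc2 : (2 * (n : Int) + 2) = (((2 * n + 2 : Nat) : Nat) : Int) := by push_cast; ring
      rw [hc2]
      rw [ih (2 * n + 2) hm2]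
      have hrb : pvRbS d n = pvRbS d (2 * n + 2) := by rw [pvRbS]; simp [h]
      have hrec : pvRecB d n (steps, descs, highs, res, path)
          = pvRecB d (2 * n + 2)
              (S2 ++ [d],
               D2 ++ ["Visit node " ++ pvTget d (n : Int) ++ " (index " ++ PySem.Int.toStr (n : Int) ++ ")"],
               H2 ++ [[(n : Int)]], R2 ++ [pvTget d (n : Int)], P2 ++ [(n : Int)]) := by
        rw [pvRecB]; simp only [h, dite_false]
        rw [hB]
      rw [hrb, hrec]

theorem pvSizeLt (d : List (Int × String)) (m : Nat) : ∀ (n : Nat), pvMeas d n ≤ m →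
    pvSize d n < 2 ^ m := by
  induction m with
  | zero =>
    intro n hn
    by_cases h : pvTget d (n : Int) = ""
    · rw [pvSize]; simp [h]
    · exact absurd hn (by have := pvMeasPos d n h; omega)
  | succ m ih =>
    intro n hn
    by_cases h : pvTget d (n : Int) = ""
    · rw [pvSize]; simp [h]
    · have h1 := ih (2 * n + 1) (by have := pvFiltLt d n (2 * n + 1) h (by omega); omega)
      have h2 := ih (2 * n + 2) (by have := pvFiltLt d n (2 * n + 2) h (by omega); omega)
      rw [pvSize]
      simp only [h, dite_false]
      have : (2 : Nat) ^ (m + 1) = 2 ^ m + 2 ^ m := by ring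
      omega

-- ===== VERDICT (by name: the statement is the Claim_ definition above) =====
theorem generate_inorder_traversal_steps_spec : Claim_equal_generate_inorder_traversal_steps := by
  intro d _
  unfold Spec_generate_inorder_traversal_steps
  unfold generate_inorder_traversal_steps generate_inorder_traversal_steps_alt
  by_cases hg : (!((PySem.Dict.mk d).contains 0) || (pvTget d 0 == "")) = true
  · rw [if_pos hg, if_pos hg]
  · rw [if_neg hg, if_neg hg]
    have hmle : pvMeas d 0 ≤ d.length := by
      have := List.length_filter_le
        (fun k => (pvTget d k != "") && ((0 : Nat) : Int) ≤ k) (d.map Prod.fst)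
      simpa [pvMeas] using this
    have hslt : pvSize d 0 < 2 ^ d.length :=
      pvSizeLt d d.length 0 hmle
    have hpow : (2 : Nat) ^ (d.length + 2) = 4 * 2 ^ d.length := by ring
    have hfuel : 2 ^ (d.length + 2)
        = 2 * pvSize d 0 + ((2 ^ (d.length + 2) - 2 * pvSize d 0 - 1) + 1) := by omega
    rw [hfuel]
    have hsim := pvSim d (pvMeas d 0) 0 le_rfl
      ((2 ^ (d.length + 2) - 2 * pvSize d 0 - 1) + 1) [] ([], [], [], [], [])
    simp only [Nat.cast_zero] at hsim
    rw [hsim]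
    rcases hR : pvRecB d 0 ([], [], [], [], []) with ⟨a, b, c, e, g⟩
    exact pvLoopA_stop d _ _ _ _ _ _ _ (by simp [pvRbS_none])
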